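-- pv_equiv track=rewrite | github.com/lbaa2022/LLMTaskPlanning | src/wah/wah_utils.py | divide_total_into_keys
-- ===== SOURCE A (Python) =====
-- def divide_total_into_keys(keys, total):
--     if not keys or total <= 0:
--         return {}
--
--     num_keys = len(keys)
--     value_per_key = total // num_keys
--     remainder = total % num_keys
--
--     result_dict = {}
--     for i, key in enumerate(keys):
--         value = value_per_key + 1 if i < remainder else value_per_key
--         result_dict[key] = value
--
--     return result_dict
-- ===== SOURCE B (Python) =====
-- def divide_total_into_keys(keys, total):
--     if not keys or total <= 0:
--         return {}
--     # greedy: each key in turn takes the ceiling share of what remains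
--     pairs = []
--     remaining_total = total
--     remaining_keys = len(keys)
--     for key in keys:
--         share = -(-remaining_total // remaining_keys)
--         pairs.append((key, share))
--         remaining_total -= share
--         remaining_keys -= 1
--     return dict(pairs)
-- ===== Notes on version B (the rewrite author's own statement) =====
-- stated objective: alternative
-- what changed: Replaces A's precomputed quotient/remainder with a greedy allocation: each key in turn takes the ceiling share of the remaining total, tracked by remaining-total/remaining-count state, with no divmod precomputation or remainder comparison.
import Mathlib
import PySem

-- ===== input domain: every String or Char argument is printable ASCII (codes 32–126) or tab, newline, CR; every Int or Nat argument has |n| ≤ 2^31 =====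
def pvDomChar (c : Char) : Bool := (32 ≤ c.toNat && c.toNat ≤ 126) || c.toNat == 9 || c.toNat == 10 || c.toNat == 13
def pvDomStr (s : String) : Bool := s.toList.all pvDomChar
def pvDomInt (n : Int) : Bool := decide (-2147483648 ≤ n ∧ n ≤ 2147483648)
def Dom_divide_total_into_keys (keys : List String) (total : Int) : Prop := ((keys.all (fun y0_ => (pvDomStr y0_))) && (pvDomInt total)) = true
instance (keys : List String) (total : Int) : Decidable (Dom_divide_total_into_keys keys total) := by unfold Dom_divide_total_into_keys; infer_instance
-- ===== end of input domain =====

-- B allocates greedily: each key takes the ceiling share of the remaining total (remaining-total/remaining-count state), instead of A's precomputed quotient/remainder loop (objective: alternative).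


-- ===== PORT A =====
def divide_total_into_keys (keys : List String) (total : Int) : List (String × Int) :=
  if keys = [] ∨ total ≤ 0 then [] else
    let num_keys : Int := (keys.length : Int)
    let value_per_key := PySem.Int.floordiv total num_keys
    let remainder := PySem.Int.mod total num_keys
    ((PySem.List.enumerate keys).foldl
      (fun d ik =>
        d.insert ik.2 (if ik.1 < remainder then value_per_key + 1 else value_per_key))
      PySem.Dict.empty).items

-- ===== PORT B =====
-- the loop: each key takes the ceiling share -(-remaining_total // remaining_keys) of what remains
def pvBLoop (keys : List String) (st : List (String × Int) × Int × Int) :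
    List (String × Int) × Int × Int :=
  keys.foldl (fun st k =>
    let share := -(PySem.Int.floordiv (-st.2.1) st.2.2)
    (st.1 ++ [(k, share)], st.2.1 - share, st.2.2 - 1)) st

def divide_total_into_keys_alt (keys : List String) (total : Int) : List (String × Int) :=
  if keys = [] ∨ total ≤ 0 then [] else
    (PySem.Dict.ofList (pvBLoop keys ([], total, (keys.length : Int))).1).items

-- ===== PRECONDITION & SPEC =====
def Spec_divide_total_into_keys (keys : List String) (total : Int) (out : List (String × Int)) : Prop := out = divide_total_into_keys_alt keys total
instance (keys : List String) (total : Int) (out : List (String × Int)) : Decidable (Spec_divide_total_into_keys keys total out) := by unfold Spec_divide_total_into_keys; infer_instance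

-- ===== CLAIM (what is proved, stated in full; the proofs are below) =====
def Claim_equal_divide_total_into_keys : Prop := ∀ (keys : List String) (total : Int), Dom_divide_total_into_keys keys total → Spec_divide_total_into_keys keys total (divide_total_into_keys keys total)

-- ===== LEMMAS AND PROOFS =====

-- recursion form of the greedy loop, used only by the proofs
def pvShares (keys : List String) (total : Int) : List (String × Int) :=
  match keys with
  | [] => []
  | k :: rest =>
      let share := -(PySem.Int.floordiv (-total) ((k :: rest).length : Int))
      (k, share) :: pvShares rest (total - share)

-- the fold with (pairs, remaining_total, remaining_keys) accumulates exactly the recursion's pairs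
theorem pvBLoop_eq_shares (keys : List String) (total : Int) (ps : List (String × Int)) :
    (pvBLoop keys (ps, total, (keys.length : Int))).1 = ps ++ pvShares keys total := by
  induction keys generalizing total ps with
  | nil => simp [pvBLoop, pvShares]
  | cons k rest ih =>
    have hlen : ((k :: rest).length : Int) - 1 = (rest.length : Int) := by
      simp [List.length_cons]
    rw [show pvBLoop (k :: rest) (ps, total, ((k :: rest).length : Int))
        = pvBLoop rest
            (ps ++ [(k, -(PySem.Int.floordiv (-total) ((k :: rest).length : Int)))],
             total - -(PySem.Int.floordiv (-total) ((k :: rest).length : Int)),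
             ((k :: rest).length : Int) - 1) from rfl]
    rw [hlen, ih]
    simp [pvShares]

theorem map_enum_shift {α β : Type} (xs : List α) (s : Int) (f : Int × α → β) :
    (PySem.List.enumerate xs (s + 1)).map f
      = (PySem.List.enumerate xs s).map (fun p => f (p.1 + 1, p.2)) := by
  induction xs generalizing s with
  | nil => simp [PySem.List.enumerate_nil]
  | cons x xs ih => simp [PySem.List.enumerate_cons, ih]

theorem map_enum_congr {α β : Type} (xs : List α) (s : Int) (f g : Int × α → β)
    (h : ∀ (j : Nat) (x : α), f (s + j, x) = g (s + j, x)) :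
    (PySem.List.enumerate xs s).map f = (PySem.List.enumerate xs s).map g := by
  apply List.map_congr_left
  intro p hp
  rcases (PySem.List.mem_enumerate_iff xs s p).mp hp with ⟨j, hj, rfl⟩
  exact h j _

-- the greedy ceiling-share recursion produces exactly A's enumerated pair list
theorem pvShares_eq_enumerate_map (keys : List String) (total : Int) (h0 : 0 ≤ total) :
    pvShares keys total
      = (PySem.List.enumerate keys).map
          (fun ik => (ik.2,
            if ik.1 < PySem.Int.mod total (keys.length : Int)
            then PySem.Int.floordiv total (keys.length : Int) + 1
            else PySem.Int.floordiv total (keys.length : Int))) := by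
  induction keys generalizing total with
  | nil => simp [pvShares, PySem.List.enumerate_nil]
  | cons k rest ih =>
    have hlen : ((k :: rest).length : Int) = (rest.length : Int) + 1 := by
      simp [List.length_cons]
    set n : Int := (rest.length : Int) + 1 with hn_def
    have hn : (0:Int) < n := by positivity
    set q := PySem.Int.floordiv total n with hq_def
    set r := PySem.Int.mod total n with hr_def
    have hqr : q * n + r = total := PySem.Int.floordiv_mul_add_mod total n
    have hr0 : 0 ≤ r := PySem.Int.mod_nonneg total hn
    have hrn : r < n := PySem.Int.mod_lt total hn
    have hq0 : 0 ≤ q := by nlinarith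
    have hshare : -(PySem.Int.floordiv (-total) n) = (if 0 < r then q + 1 else q) := by
      rw [PySem.Int.neg_floordiv_neg_eq_iff_of_pos hn]
      by_cases hr : 0 < r
      · simp only [if_pos hr]; constructor <;> nlinarith
      · simp only [if_neg hr]; constructor <;> nlinarith
    set share := (if 0 < r then q + 1 else q) with hshare_def
    set r'' := (if 0 < r then r - 1 else (0:Int)) with hr''_def
    have htot' : total - share = q * (n - 1) + r'' := by
      by_cases hr : 0 < r <;> simp only [hshare_def, hr''_def, hr, if_pos, ite_false] <;>
        nlinarith
    have h0' : 0 ≤ total - share := by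
      rw [htot']
      have : 0 ≤ r'' := by rw [hr''_def]; split_ifs <;> omega
      nlinarith
    rw [show pvShares (k :: rest) total
        = (k, -(PySem.Int.floordiv (-total) ((k :: rest).length : Int)))
            :: pvShares rest (total - -(PySem.Int.floordiv (-total) ((k :: rest).length : Int)))
      from rfl]
    rw [PySem.List.enumerate_cons, List.map_cons]
    rw [hlen, hshare]
    refine congrArg₂ _ rfl ?_
    -- tail: the recursive call equals the shifted enumerate map
    cases rest with
    | nil => simp [pvShares, PySem.List.enumerate_nil]
    | cons k2 rest2 =>
      set m : Int := ((k2 :: rest2).length : Int) with hm_def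
      have hm : (0:Int) < m := by rw [hm_def]; exact_mod_cast Nat.succ_pos rest2.length
      have hmn : m = n - 1 := by simp [hm_def, hn_def, List.length_cons]
      have hr''bounds : 0 ≤ r'' ∧ r'' < n - 1 := by
        by_cases hr : 0 < r <;> simp [hr''_def, hr] <;>
          simp [hm_def, List.length_cons] at hmn ⊢ <;> omega
      have hq' : PySem.Int.floordiv (total - share) m = q := by
        rw [PySem.Int.floordiv_eq_iff_of_pos hm, hmn]
        obtain ⟨h1, h2⟩ := hr''bounds
        constructor <;> nlinarith
      have hr' : PySem.Int.mod (total - share) m = r'' := by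
        have h := PySem.Int.floordiv_mul_add_mod (total - share) m
        rw [hq'] at h
        rw [← hmn] at htot'
        linarith
      rw [ih (total - share) h0', hq', hr']
      rw [map_enum_shift]
      apply map_enum_congr
      intro j x
      have hcond : ((0:Int) + (j:Int)) + 1 < r ↔ (0:Int) + (j:Int) < r'' := by
        rcases hr''bounds with ⟨hb1, hb2⟩
        by_cases hr : 0 < r <;> simp [hr''_def, hr] <;> omega
      simp only [← hr_def, ← hq_def, hcond]

theorem divide_total_into_keys_eq (keys : List String) (total : Int) :
    divide_total_into_keys keys total = divide_total_into_keys_alt keys total := by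
  unfold divide_total_into_keys divide_total_into_keys_alt
  by_cases h : keys = [] ∨ total ≤ 0
  · simp [h]
  · simp only [if_neg h]
    have h0 : 0 ≤ total := le_of_lt (by omega : 0 < total)
    rw [pvBLoop_eq_shares keys total [], List.nil_append,
      pvShares_eq_enumerate_map keys total h0]
    simp [PySem.Dict.ofList, PySem.Dict.update, List.foldl_map]

-- ===== VERDICT (by name: the statement is the Claim_ definition above) =====
theorem divide_total_into_keys_spec : Claim_equal_divide_total_into_keys := by
  intro keys total _
  exact divide_total_into_keys_eq keys total
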